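-- pv_equiv track=rewrite | github.com/dfloer/OpenCity2k | image_parse.py | animation_get_pixel
-- ===== SOURCE A (Python) =====
-- def animation_get_pixel(pix_coords, anim_idx, anim_check, anim_list, anim_list_len, flash_delay):
--     """
--     Takes the current palette coordinates for a pixel for an animation.
--     Args:
--         pix_coords (tuple): (x, y) coordinates of the pixel's colour in the pallet.
--         anim_idx (int): which frame is this?
--         anim_check (list): list of all the coordinates corresponding to an animation.
--         anim_list (list): List of the pallet indices for the various colour cycles.
--         anim_list_len ([int]): number of items in the anim_list
--         flash_delay (int): delay, in milliseconds, between each frame.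
--     Returns:
--         the new pixel coordinates for an animation.
--     """
--     flash_lists = (6, 7, 8, 9)
--
--     # Short circuit if the anim_idx is 0 because this means the pixel we're already on.
--     if anim_idx == 0:
--         return pix_coords
--     # Find where our value is in the list of all the values together.
--     pixel_idx = anim_check.index(pix_coords)
--     which_list = 0
--     # And then use this large value to figure out which actual animation list contains it
--     for list_idx, x in enumerate(anim_list_len):
--         if (pixel_idx - x) < 0:
--             which_list = list_idx  # Because we've been decrementing pixel_idx, when we hit this case, it'll be pointing at the right list element.
--             break
--         else:
--             pixel_idx -= x  # Each time we rule out a list, we decrement the size of that list.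
--     anim_pixels = anim_list[which_list]  # Get the list of pixel values we actually want to use.
--     new_pix_idx = (pixel_idx + anim_idx) % len(anim_pixels)  # Get the pixel that we should be drawing this frame.
--
--     # Handle the four two colour flashers, that don't change every iteration.
--     if which_list in flash_lists:
--         delay_period = (anim_idx // flash_delay) % 2  # for a flash_delay of 2, will produce something like 00110011...
--         return anim_pixels[new_pix_idx ^ delay_period]
--     return anim_pixels[new_pix_idx]  # finally return the coordinates into the palette.
-- ===== SOURCE B (Python) =====
-- def animation_get_pixel(pix_coords, anim_idx, anim_check, anim_list, anim_list_len, flash_delay):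
--     if anim_idx == 0:
--         return pix_coords
--     pixel_idx = anim_check.index(pix_coords)
--     # Cumulative sizes of the colour cycles, then the first bucket whose boundary exceeds the index.
--     bounds = []
--     total = 0
--     for x in anim_list_len:
--         total += x
--         bounds.append(total)
--     which_list = next(j for j, b in enumerate(bounds) if pixel_idx < b)
--     offset = pixel_idx - bounds[which_list] + anim_list_len[which_list]
--     anim_pixels = anim_list[which_list]
--     new_pix_idx = (offset + anim_idx) % len(anim_pixels)
--     if which_list in (6, 7, 8, 9):
--         new_pix_idx ^= (anim_idx // flash_delay) % 2
--     return anim_pixels[new_pix_idx]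
-- ===== Notes on version B (the rewrite author's own statement) =====
-- stated objective: alternative
-- what changed: A's destructive subtract-and-break loop over anim_list_len is replaced by building the cumulative-boundaries table once and locating the bucket as the first index whose cumulative total exceeds the pixel index, reading the offset back from the table; Pre_ excludes inputs where A's loop falls through without breaking (pixel index not below any cumulative boundary), since A's value there (list 0 with a fully decremented offset) is an accident of the loop and B's search raises StopIteration.
-- outside the precondition, e.g. on animation_get_pixel((1, 2), 1, [(1, 2)], [[(3, 4), (5, 6)]], [0], 2): A returns (5, 6), B raises StopIteration
import Mathlib
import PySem

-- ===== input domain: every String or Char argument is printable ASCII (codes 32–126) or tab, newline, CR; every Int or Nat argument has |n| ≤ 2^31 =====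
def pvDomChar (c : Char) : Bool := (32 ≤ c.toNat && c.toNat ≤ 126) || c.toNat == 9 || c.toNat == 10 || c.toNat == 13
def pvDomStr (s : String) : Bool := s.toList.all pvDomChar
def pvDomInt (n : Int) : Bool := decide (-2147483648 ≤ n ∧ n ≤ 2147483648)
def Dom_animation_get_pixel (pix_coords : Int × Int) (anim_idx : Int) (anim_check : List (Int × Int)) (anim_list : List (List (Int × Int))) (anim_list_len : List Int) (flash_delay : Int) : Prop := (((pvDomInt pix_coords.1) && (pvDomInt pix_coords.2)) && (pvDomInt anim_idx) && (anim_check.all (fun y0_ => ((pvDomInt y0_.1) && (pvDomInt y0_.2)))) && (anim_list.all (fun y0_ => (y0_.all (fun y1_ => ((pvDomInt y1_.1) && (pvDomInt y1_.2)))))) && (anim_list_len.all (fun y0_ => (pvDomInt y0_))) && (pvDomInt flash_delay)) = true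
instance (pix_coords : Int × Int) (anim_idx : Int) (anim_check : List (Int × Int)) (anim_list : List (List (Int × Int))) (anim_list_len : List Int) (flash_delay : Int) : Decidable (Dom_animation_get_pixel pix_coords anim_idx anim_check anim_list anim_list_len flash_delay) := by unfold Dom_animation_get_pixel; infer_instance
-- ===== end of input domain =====

-- B replaces A's destructive subtract-and-break loop by a cumulative-boundaries table built
-- once plus a first-index search into it (objective: alternative decomposition, same cost).

-- ===== PORT A =====
-- A's `for list_idx, x in enumerate(anim_list_len)` loop: carries the running counter and the
-- decremented pixel_idx; returns (which_list, pixel_idx); falls through to (0, pixel_idx).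
def pvALoop : Nat → List Int → Int → (Nat × Int)
  | _, [], p => (0, p)
  | i, x :: rest, p => if p - x < 0 then (i, p) else pvALoop (i + 1) rest (p - x)

def animation_get_pixel (pix_coords : Int × Int) (anim_idx : Int) (anim_check : List (Int × Int)) (anim_list : List (List (Int × Int))) (anim_list_len : List Int) (flash_delay : Int) : Int × Int :=
  if anim_idx = 0 then pix_coords
  else
    match PySem.List.index? anim_check pix_coords with
    | none => (0, 0)  -- ValueError in Python; excluded by Pre_
    | some i0 =>
      match pvALoop 0 anim_list_len (Int.ofNat i0) with
      | (which_list, pixel_idx) =>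
        match PySem.List.pyGet? anim_list (Int.ofNat which_list) with
        | none => (0, 0)  -- IndexError; excluded by Pre_
        | some anim_pixels =>
          let new_pix_idx := PySem.Int.mod (pixel_idx + anim_idx) (Int.ofNat anim_pixels.length)  -- ZeroDivisionError (empty list) excluded by Pre_
          if which_list = 6 ∨ which_list = 7 ∨ which_list = 8 ∨ which_list = 9 then
            let delay_period := PySem.Int.mod (PySem.Int.floordiv anim_idx flash_delay) 2  -- flash_delay = 0 excluded by Pre_
            (PySem.List.pyGet? anim_pixels (PySem.Int.bxor new_pix_idx delay_period)).getD (0, 0)  -- IndexError excluded by Pre_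
          else
            (PySem.List.pyGet? anim_pixels new_pix_idx).getD (0, 0)

-- ===== PORT B =====
-- B's `total = 0; for x in anim_list_len: total += x; bounds.append(total)`
def pvCumLoop : Int → List Int → List Int
  | _, [] => []
  | t, x :: rest => (t + x) :: pvCumLoop (t + x) rest

-- B's `next(j for j, b in enumerate(bounds) if pixel_idx < b)`: scans bounds, carrying j
def pvFindBucket : Int → Nat → List Int → Option Nat
  | _, _, [] => none
  | p, j, b :: rest => if p < b then some j else pvFindBucket p (j + 1) rest

def animation_get_pixel_alt (pix_coords : Int × Int) (anim_idx : Int) (anim_check : List (Int × Int)) (anim_list : List (List (Int × Int))) (anim_list_len : List Int) (flash_delay : Int) : Int × Int :=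
  if anim_idx = 0 then pix_coords
  else
    match PySem.List.index? anim_check pix_coords with
    | none => (0, 0)  -- ValueError; excluded by Pre_
    | some i0 =>
      let bounds := pvCumLoop 0 anim_list_len
      match pvFindBucket (Int.ofNat i0) 0 bounds with
      | none => (0, 0)  -- B's `next` raises StopIteration; excluded by Pre_
      | some j =>
        let offset := Int.ofNat i0 - (PySem.List.pyGet? bounds (Int.ofNat j)).getD 0 + (PySem.List.pyGet? anim_list_len (Int.ofNat j)).getD 0
        match PySem.List.pyGet? anim_list (Int.ofNat j) with
        | none => (0, 0)  -- IndexError; excluded by Pre_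
        | some anim_pixels =>
          let idx0 := PySem.Int.mod (offset + anim_idx) (Int.ofNat anim_pixels.length)
          let new_pix_idx :=
            if j = 6 ∨ j = 7 ∨ j = 8 ∨ j = 9 then
              PySem.Int.bxor idx0 (PySem.Int.mod (PySem.Int.floordiv anim_idx flash_delay) 2)
            else idx0
          (PySem.List.pyGet? anim_pixels new_pix_idx).getD (0, 0)

-- ===== PRECONDITION & SPEC =====
-- Pre_ excludes the inputs where Python A raises (pix_coords missing from anim_check: ValueError;
-- bucket index beyond anim_list: IndexError; an empty selected cycle: ZeroDivisionError from % 0;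
-- in the flash branch flash_delay = 0 or the XOR-ed index past the end of the cycle), and also the
-- inputs where A's bucket loop falls through without breaking (the pixel index is not below any
-- cumulative boundary): A's value there — list 0 with a fully decremented offset — is an accident
-- of the loop, and B's search raises StopIteration there.
def Pre_animation_get_pixel (pix_coords : Int × Int) (anim_idx : Int) (anim_check : List (Int × Int)) (anim_list : List (List (Int × Int))) (anim_list_len : List Int) (flash_delay : Int) : Prop :=
  anim_idx = 0 ∨
  (pix_coords ∈ anim_check ∧
   (let p : Int := Int.ofNat ((PySem.List.index? anim_check pix_coords).getD 0)
    ∃ j, j < anim_list_len.length ∧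
      p < (anim_list_len.take (j + 1)).sum ∧
      (∀ k < j, (anim_list_len.take (k + 1)).sum ≤ p) ∧
      j < anim_list.length ∧
      (anim_list.getD j []).length ≠ 0 ∧
      ((j = 6 ∨ j = 7 ∨ j = 8 ∨ j = 9) →
        flash_delay ≠ 0 ∧
        PySem.Int.bxor (PySem.Int.mod ((p - (anim_list_len.take j).sum) + anim_idx) (Int.ofNat (anim_list.getD j []).length))
            (PySem.Int.mod (PySem.Int.floordiv anim_idx flash_delay) 2)
          < Int.ofNat (anim_list.getD j []).length)))

instance (pix_coords : Int × Int) (anim_idx : Int) (anim_check : List (Int × Int)) (anim_list : List (List (Int × Int))) (anim_list_len : List Int) (flash_delay : Int) : Decidable (Pre_animation_get_pixel pix_coords anim_idx anim_check anim_list anim_list_len flash_delay) := by unfold Pre_animation_get_pixel; infer_instance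

def pvWitness_animation_get_pixel : (Int × Int) × Int × (List (Int × Int)) × (List (List (Int × Int))) × List Int × Int :=
  ((1, 2), 1, [(1, 2)], [[(3, 4)]], [1], 2)

def Spec_animation_get_pixel (pix_coords : Int × Int) (anim_idx : Int) (anim_check : List (Int × Int)) (anim_list : List (List (Int × Int))) (anim_list_len : List Int) (flash_delay : Int) (out : Int × Int) : Prop := out = animation_get_pixel_alt pix_coords anim_idx anim_check anim_list anim_list_len flash_delay
instance (pix_coords : Int × Int) (anim_idx : Int) (anim_check : List (Int × Int)) (anim_list : List (List (Int × Int))) (anim_list_len : List Int) (flash_delay : Int) (out : Int × Int) : Decidable (Spec_animation_get_pixel pix_coords anim_idx anim_check anim_list anim_list_len flash_delay out) := by unfold Spec_animation_get_pixel; infer_instance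

-- ===== CLAIM (what is proved, stated in full; the proofs are below) =====
def Claim_equal_animation_get_pixel : Prop := ∀ (pix_coords : Int × Int) (anim_idx : Int) (anim_check : List (Int × Int)) (anim_list : List (List (Int × Int))) (anim_list_len : List Int) (flash_delay : Int), Dom_animation_get_pixel pix_coords anim_idx anim_check anim_list anim_list_len flash_delay → Pre_animation_get_pixel pix_coords anim_idx anim_check anim_list anim_list_len flash_delay → Spec_animation_get_pixel pix_coords anim_idx anim_check anim_list anim_list_len flash_delay (animation_get_pixel pix_coords anim_idx anim_check anim_list anim_list_len flash_delay)

-- ===== LEMMAS AND PROOFS =====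

theorem pvCumLoop_length (lens : List Int) : ∀ c : Int, (pvCumLoop c lens).length = lens.length := by
  induction lens with
  | nil => intro c; simp [pvCumLoop]
  | cons x rest ih => intro c; simp [pvCumLoop, ih]

-- entries of the bounds table are prefix sums (shifted by the accumulator)
theorem pvCumLoop_getElem (lens : List Int) : ∀ (c : Int) (k : Nat), (hk : k < lens.length) →
    (pvCumLoop c lens)[k]? = some (c + (lens.take (k + 1)).sum) := by
  induction lens with
  | nil => intro c k hk; simp at hk
  | cons x rest ih =>
    intro c k hk
    cases k with
    | zero => simp [pvCumLoop]
    | succ k' =>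
      have hk' : k' < rest.length := by simpa using hk
      simp only [pvCumLoop, List.getElem?_cons_succ]
      rw [ih (c + x) k' hk']
      simp [add_assoc]

-- B's search finds the first index whose boundary exceeds p
theorem pvFindBucket_first (bs : List Int) : ∀ (j0 : Nat) (p : Int) (j : Nat) (hj : j < bs.length),
    p < bs[j] → (∀ k (hk : k < j), ¬ p < bs[k]'(by omega)) → pvFindBucket p j0 bs = some (j0 + j) := by
  induction bs with
  | nil => intro _ _ j hj; simp at hj
  | cons b rest ih =>
    intro j0 p j hj hlt hmin
    by_cases hb : p < b
    · have hj0 : j = 0 := by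
        by_contra h
        exact (hmin 0 (by omega)) hb
      subst hj0
      simp [pvFindBucket, hb]
    · have hjne : j ≠ 0 := by
        intro h; subst h; exact hb (by simpa using hlt)
      obtain ⟨j', rfl⟩ : ∃ j', j = j' + 1 := ⟨j - 1, by omega⟩
      have hj' : j' < rest.length := by simpa using hj
      simp only [pvFindBucket, if_neg hb]
      rw [ih (j0 + 1) p j' hj' (by simpa using hlt)
        (fun k hk => by simpa using hmin (k + 1) (by omega))]
      congr 1
      omega

-- A's subtract-and-break loop lands on the same first index, with the prefix-sum offset
theorem pvALoop_first (lens : List Int) : ∀ (i0 : Nat) (p : Int) (j : Nat), j < lens.length →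
    p < (lens.take (j + 1)).sum → (∀ k < j, (lens.take (k + 1)).sum ≤ p) →
    pvALoop i0 lens p = (i0 + j, p - (lens.take j).sum) := by
  induction lens with
  | nil => intro _ _ j hj; simp at hj
  | cons x rest ih =>
    intro i0 p j hj hlt hmin
    by_cases hx : p - x < 0
    · have hj0 : j = 0 := by
        by_contra h
        have := hmin 0 (by omega)
        simp at this
        omega
      subst hj0
      simp [pvALoop, hx]
    · have hjne : j ≠ 0 := by
        intro h; subst h
        simp at hlt
        omega
      obtain ⟨j', rfl⟩ : ∃ j', j = j' + 1 := ⟨j - 1, by omega⟩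
      have hj' : j' < rest.length := by simpa using hj
      simp only [pvALoop, if_neg hx]
      have hlt' : p - x < (rest.take (j' + 1)).sum := by
        have : (List.take (j' + 1 + 1) (x :: rest)).sum = x + (rest.take (j' + 1)).sum := by
          simp [List.take_succ_cons]
        omega
      have hmin' : ∀ k < j', (rest.take (k + 1)).sum ≤ p - x := by
        intro k hk
        have := hmin (k + 1) (by omega)
        simp [List.take_succ_cons] at this
        omega
      rw [ih (i0 + 1) (p - x) j' hj' hlt' hmin']
      have hts : (List.take (j' + 1) (x :: rest)).sum = x + (rest.take j').sum := by
        simp [List.take_succ_cons]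
      rw [Prod.mk.injEq]
      exact ⟨by omega, by omega⟩

-- ===== VERDICT (by name: the statement is the Claim_ definition above) =====
theorem animation_get_pixel_spec : Claim_equal_animation_get_pixel := by
  intro pix_coords anim_idx anim_check anim_list anim_list_len flash_delay _ hpre
  unfold Spec_animation_get_pixel animation_get_pixel animation_get_pixel_alt
  by_cases h0 : anim_idx = 0
  · simp [h0]
  · simp only [if_neg h0]
    rcases hpre with h | ⟨hmem, hrest⟩
    · exact absurd h h0
    obtain ⟨i0, hidx⟩ := Option.isSome_iff_exists.mp ((PySem.List.index?_isSome_iff _ _).mpr hmem)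
    rw [hidx]
    dsimp only
    simp only [hidx, Option.getD_some] at hrest
    obtain ⟨j, hjlen, hlt, hmin, _, _, _⟩ := hrest
    -- A side: the loop breaks at j
    rw [pvALoop_first anim_list_len 0 (Int.ofNat i0) j hjlen hlt hmin]
    simp only [Nat.zero_add]
    -- B side: the table search finds j
    have hblen : j < (pvCumLoop 0 anim_list_len).length := by rw [pvCumLoop_length]; exact hjlen
    have hbj : (pvCumLoop 0 anim_list_len)[j]? = some ((anim_list_len.take (j + 1)).sum) := by
      have := pvCumLoop_getElem anim_list_len 0 j hjlen
      simpa using this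
    have hfind : pvFindBucket (Int.ofNat i0) 0 (pvCumLoop 0 anim_list_len) = some j := by
      have hbj' : (pvCumLoop 0 anim_list_len)[j] = (anim_list_len.take (j + 1)).sum := by
        have := hbj; rw [List.getElem?_eq_getElem hblen] at this; exact Option.some.inj this
      refine (pvFindBucket_first _ 0 (Int.ofNat i0) j hblen (by rw [hbj']; exact hlt) ?_).trans (by simp)
      intro k hk
      have hkl : k < (pvCumLoop 0 anim_list_len).length := by omega
      have hkv : (pvCumLoop 0 anim_list_len)[k] = (anim_list_len.take (k + 1)).sum := by
        have := pvCumLoop_getElem anim_list_len 0 k (by rw [pvCumLoop_length] at hkl; exact hkl)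
        rw [List.getElem?_eq_getElem hkl] at this
        simpa using Option.some.inj this
      rw [hkv]
      exact not_lt.mpr (hmin k hk)
    rw [hfind]
    -- the offsets agree: i0 - bounds[j] + lens[j] = i0 - (take j).sum
    have hget_b : PySem.List.pyGet? (pvCumLoop 0 anim_list_len) (Int.ofNat j) = some ((anim_list_len.take (j + 1)).sum) := by
      have : (Int.ofNat j) = ((j : Nat) : Int) := rfl
      rw [this, PySem.List.pyGet?_natCast]
      exact hbj
    have hget_l : PySem.List.pyGet? anim_list_len (Int.ofNat j) = some (anim_list_len[j]'hjlen) := by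
      have : (Int.ofNat j) = ((j : Nat) : Int) := rfl
      rw [this, PySem.List.pyGet?_natCast]
      exact List.getElem?_eq_getElem hjlen
    have hoff : Int.ofNat i0 - (PySem.List.pyGet? (pvCumLoop 0 anim_list_len) (Int.ofNat j)).getD 0 + (PySem.List.pyGet? anim_list_len (Int.ofNat j)).getD 0
        = Int.ofNat i0 - (anim_list_len.take j).sum := by
      rw [hget_b, hget_l]
      simp only [Option.getD_some]
      have : (anim_list_len.take (j + 1)).sum = (anim_list_len.take j).sum + anim_list_len[j]'hjlen :=
        List.sum_take_succ _ _ _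
      omega
    simp only [hoff]
    cases hget : PySem.List.pyGet? anim_list (Int.ofNat j) with
    | none => rfl
    | some anim_pixels =>
      by_cases hf : j = 6 ∨ j = 7 ∨ j = 8 ∨ j = 9
      · simp only [if_pos hf]
      · simp only [if_neg hf]
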